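-- pv_equiv track=rewrite | github.com/CS-for-non-CS/ThisIsCodingTest | 영송/Part3/1.Greedy/Muzi.py | solution
-- ===== SOURCE A (Python) =====
-- def solution(food_times, k):
--     n = len(food_times)
--     # while 사용으로 바꾸기
--     # k가 food_times의 sum 보다 큰 케이스에 대한 예외 처리
--     # 반복 시행 후 k와 food_times sum 값을 비교하는 것보다
--     # 시행 초기에 값의 대수 비교
--     for i in range(k+1):
--         # 만약, while 을 사용시, n은 고정시켜야 함
--         # food_times에서 원소를 삭제시키면 본래 index 정보가 사라짐
--         i %= n
--         # i번째 횟수에 foot times가 감소하지 않으므로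
--         # while로 바꿔서 else인 경우 i를 업데이트 하도록 변경
--         if food_times[i] == 0:
--             continue
--         else:
--             food_times[i] -= 1
--
--     answer = food_times[(k+1)//n]+1
--
--     return answer
-- ===== SOURCE B (Python) =====
-- def solution(food_times, k):
--     # O(1): only the position read at the end matters; count its visits in closed form.
--     # (A mutates food_times in place; this implementation does not.)
--     n = len(food_times)
--     p = ((k + 1) // n) % n                 # position read after the k+1 steps
--     visits = max(0, (k - p) // n + 1)      # how many of steps 0..k land on p
--     return max(0, food_times[p] - visits) + 1
-- ===== Notes on version B (the rewrite author's own statement) =====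
-- stated objective: faster
-- what changed: B replaces A's k+1-step round-robin decrement simulation with an O(1) closed form (the position read at the end and its visit count); Pre_ excludes inputs where A raises (empty list, final read index out of range) and inputs whose food time at the finally-read position is negative — outside the natural domain of nonnegative durations, where A's below-zero decrementing and B's clamping at zero are both accidental choices.
-- outside the precondition, e.g. on solution([1, -3], 1): A returns -3, B returns 1
import Mathlib
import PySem

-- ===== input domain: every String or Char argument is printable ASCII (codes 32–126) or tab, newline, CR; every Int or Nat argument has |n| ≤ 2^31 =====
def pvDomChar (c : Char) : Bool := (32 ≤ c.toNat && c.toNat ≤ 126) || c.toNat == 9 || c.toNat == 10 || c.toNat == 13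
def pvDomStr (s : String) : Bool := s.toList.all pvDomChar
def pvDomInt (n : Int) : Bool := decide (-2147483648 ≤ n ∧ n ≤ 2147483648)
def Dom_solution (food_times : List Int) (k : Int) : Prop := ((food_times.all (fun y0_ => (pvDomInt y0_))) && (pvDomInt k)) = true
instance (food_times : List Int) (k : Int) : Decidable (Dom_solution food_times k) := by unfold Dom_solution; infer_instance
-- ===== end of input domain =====

-- B computes the single position A reads via a closed-form visit count (O(1) instead of A's O(k) loop).
-- A mutates food_times in place; B does not — the equivalence proved here is about the return value only.

-- ===== PORT A =====
-- one iteration of A's loop body (i %= n; skip if 0 else decrement)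
def pvStepA (n : Int) (ft : List Int) (i : Int) : List Int :=
  if PySem.List.pyGetD ft (PySem.Int.mod i n) 0 = 0 then ft
  else PySem.List.pySetD ft (PySem.Int.mod i n) (PySem.List.pyGetD ft (PySem.Int.mod i n) 0 - 1)

def solution (food_times : List Int) (k : Int) : Int :=
  let n : Int := (food_times.length : Int)
  let ft := (PySem.List.pyRange 0 (k+1) 1).foldl (pvStepA n) food_times
  PySem.List.pyGetD ft (PySem.Int.floordiv (k+1) n) 0 + 1

-- ===== PORT B =====
def solution_alt (food_times : List Int) (k : Int) : Int :=
  let n : Int := (food_times.length : Int)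
  let p := PySem.Int.mod (PySem.Int.floordiv (k + 1) n) n
  let visits := max 0 (PySem.Int.floordiv (k - p) n + 1)
  max 0 (PySem.List.pyGetD food_times p 0 - visits) + 1

-- ===== PRECONDITION & SPEC =====
-- Pre_ excludes (a) the inputs on which A raises — the empty list (ZeroDivisionError) and a final
-- read index (k+1)//n outside [-n, n) (IndexError) — and (b) inputs whose food time at the
-- position read at the end, ((k+1)//n) % n, is negative: food times are durations, so that value
-- lies outside the task's natural domain, and there A's below-zero decrementing and B's clamping
-- at zero are both accidental choices.
def Pre_solution (food_times : List Int) (k : Int) : Prop :=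
  food_times ≠ [] ∧
  -((food_times.length : Int) * (food_times.length : Int)) ≤ k + 1 ∧
  k + 1 < (food_times.length : Int) * (food_times.length : Int) ∧
  0 ≤ PySem.List.pyGetD food_times
        (PySem.Int.mod (PySem.Int.floordiv (k + 1) (food_times.length : Int)) (food_times.length : Int)) 0
instance (food_times : List Int) (k : Int) : Decidable (Pre_solution food_times k) := by
  unfold Pre_solution; infer_instance
def pvWitness_solution : List Int × Int := ([3, 1, 2], 5)
def Spec_solution (food_times : List Int) (k : Int) (out : Int) : Prop := out = solution_alt food_times k
instance (food_times : List Int) (k : Int) (out : Int) : Decidable (Spec_solution food_times k out) := by unfold Spec_solution; infer_instance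

-- ===== CLAIM (what is proved, stated in full; the proofs are below) =====
def Claim_equal_solution : Prop := ∀ (food_times : List Int) (k : Int), Dom_solution food_times k → Pre_solution food_times k → Spec_solution food_times k (solution food_times k)

-- ===== LEMMAS AND PROOFS =====

-- value at a position after c visits of A's loop
def pvEatVal (v c : Int) : Int := if v < 0 then v - c else max 0 (v - c)

lemma pvEatVal_zero (v : Int) : pvEatVal v 0 = v := by
  unfold pvEatVal; split_ifs <;> omega

lemma pvEatVal_succ (v c : Int) (hc : 0 ≤ c) :
    pvEatVal v (c + 1) = if pvEatVal v c = 0 then 0 else pvEatVal v c - 1 := by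
  unfold pvEatVal; split_ifs <;> omega

lemma pvFold_length (n : Int) (l : List Int) (xs : List Int) :
    (l.foldl (pvStepA n) xs).length = xs.length := by
  induction l generalizing xs with
  | nil => rfl
  | cons i l ih =>
      simp only [List.foldl_cons, ih]
      unfold pvStepA
      split_ifs <;> simp [PySem.List.length_pySetD]

-- the floordiv step fact behind the visit count
lemma pvShift (n p K : Int) (hn : 0 < n) (hp0 : 0 ≤ p) (hpn : p < n) :
    PySem.Int.floordiv (K - p) n =
      PySem.Int.floordiv (K - 1 - p) n + (if PySem.Int.mod K n = p then 1 else 0) := by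
  have hdec := PySem.Int.floordiv_mul_add_mod K n
  have hr0 := PySem.Int.mod_nonneg K hn
  have hrn := PySem.Int.mod_lt K hn
  set t := PySem.Int.floordiv K n with ht
  set r := PySem.Int.mod K n with hr
  split_ifs with h1
  · have d1 : PySem.Int.floordiv (K - p) n = t := by
      rw [PySem.Int.floordiv_eq_iff_of_pos hn]
      constructor <;> nlinarith
    have d2 : PySem.Int.floordiv (K - 1 - p) n = t - 1 := by
      rw [PySem.Int.floordiv_eq_iff_of_pos hn]
      constructor <;> nlinarith
    omega
  · rcases lt_or_gt_of_ne h1 with hc | hc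
    · have d1 : PySem.Int.floordiv (K - p) n = t - 1 := by
        rw [PySem.Int.floordiv_eq_iff_of_pos hn]
        constructor <;> nlinarith
      have d2 : PySem.Int.floordiv (K - 1 - p) n = t - 1 := by
        rw [PySem.Int.floordiv_eq_iff_of_pos hn]
        constructor <;> nlinarith
      omega
    · have d1 : PySem.Int.floordiv (K - p) n = t := by
        rw [PySem.Int.floordiv_eq_iff_of_pos hn]
        constructor <;> nlinarith
      have d2 : PySem.Int.floordiv (K - 1 - p) n = t := by
        rw [PySem.Int.floordiv_eq_iff_of_pos hn]
        constructor <;> nlinarith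
      omega

-- the visit count is never negative
lemma pvCount_nonneg (n a : Int) (hn : 0 < n) (ha : -n ≤ a) :
    0 ≤ PySem.Int.floordiv a n + 1 := by
  have h : -1 ≤ PySem.Int.floordiv a n := by
    rw [PySem.Int.le_floordiv_iff_mul_le hn]
    linarith
  omega

-- the count of an untouched prefix is zero
lemma pvCount_zero (n p : Int) (hn : 0 < n) (hp0 : 0 ≤ p) (hpn : p < n) :
    PySem.Int.floordiv (-1 - p) n + 1 = 0 := by
  have : PySem.Int.floordiv (-1 - p) n = -1 := by
    rw [PySem.Int.floordiv_eq_iff_of_pos hn]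
    constructor <;> linarith
  omega

-- main invariant: position p of A's list after the first K loop iterations
lemma pvFold_get (xs : List Int) (hn : 0 < xs.length) (K p : Nat) (hp : p < xs.length) :
    PySem.List.pyGetD ((PySem.List.pyRange 0 (K : Int) 1).foldl (pvStepA (xs.length : Int)) xs) (p : Int) 0
      = pvEatVal (PySem.List.pyGetD xs (p : Int) 0)
          (PySem.Int.floordiv ((K : Int) - 1 - (p : Int)) (xs.length : Int) + 1) := by
  induction K generalizing p with
  | zero =>
      rw [show ((0 : Nat) : Int) = 0 by rfl, PySem.List.pyRange_one_eq_nil (le_refl 0)]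
      simp only [List.foldl_nil]
      rw [show (0 : Int) - 1 - (p : Int) = -1 - (p : Int) by ring,
        pvCount_zero (xs.length : Int) (p : Int) (by exact_mod_cast hn) (by positivity)
          (by exact_mod_cast hp), pvEatVal_zero]
  | succ K ih =>
      have hcast : ((K + 1 : Nat) : Int) = (K : Int) + 1 := by push_cast; ring
      rw [hcast, PySem.List.pyRange_one_succ_right (by positivity), List.foldl_append,
        List.foldl_cons, List.foldl_nil]
      set L := (PySem.List.pyRange 0 (K : Int) 1).foldl (pvStepA (xs.length : Int)) xs with hLdef
      have hL : L.length = xs.length := pvFold_length _ _ _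
      have hnI : (0 : Int) < (xs.length : Int) := by exact_mod_cast hn
      have hj : PySem.Int.mod (K : Int) (xs.length : Int) = ((K % xs.length : Nat) : Int) :=
        PySem.Int.mod_natCast K xs.length
      set jn := K % xs.length with hjndef
      have hjn : jn < xs.length := Nat.mod_lt _ hn
      have hjnL : jn < L.length := by omega
      have hshift := pvShift (xs.length : Int) (p : Int) (K : Int) hnI (by positivity)
        (by exact_mod_cast hp)
      have hcnt : (K : Int) + 1 - 1 - (p : Int) = (K : Int) - (p : Int) := by ring
      rw [hcnt]
      have hc0 : 0 ≤ PySem.Int.floordiv ((K : Int) - 1 - (p : Int)) (xs.length : Int) + 1 :=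
        pvCount_nonneg _ _ hnI (by
          have : (p : Int) < (xs.length : Int) := by exact_mod_cast hp
          omega)
      unfold pvStepA
      rw [hj]
      by_cases hpj : p = jn
      · subst hpj
        rw [if_pos (by rw [hj])] at hshift
        rw [hshift, pvEatVal_succ _ _ hc0, ih _ hp]
        split_ifs with h0
        · rw [ih _ hp]; exact h0
        · rw [PySem.List.pyGetD_pySetD_natCast L jn jn _ _ hjnL, if_pos rfl]
      · rw [if_neg (by rw [hj]; intro h; exact hpj (by exact_mod_cast h.symm))] at hshift
        rw [hshift, add_zero]
        split_ifs with h0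
        · exact ih p hp
        · rw [PySem.List.pyGetD_pySetD_natCast L jn p _ _ hjnL, if_neg hpj]
          exact ih p hp

-- ===== VERDICT (by name: the statement is the Claim_ definition above) =====
theorem solution_spec : Claim_equal_solution := by
  intro xs k _ hpre
  obtain ⟨hne, hlo, hhi, hv0pre⟩ := hpre
  unfold Spec_solution solution solution_alt
  simp only []
  have hn : 0 < xs.length := List.length_pos_of_ne_nil hne
  have hnI : (0 : Int) < (xs.length : Int) := by exact_mod_cast hn
  set nI := (xs.length : Int) with hnIdef
  set q := PySem.Int.floordiv (k + 1) nI with hq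
  have hq1 : -nI ≤ q := by
    rw [hq, PySem.Int.le_floordiv_iff_mul_le hnI]
    have : -nI * nI = -(nI * nI) := by ring
    linarith
  have hq2 : q < nI := by
    rw [hq, PySem.Int.floordiv_lt_iff_lt_mul hnI]
    linarith
  set pI := PySem.Int.mod q nI with hpIdef
  have hdecq := PySem.Int.floordiv_mul_add_mod q nI
  have hm0 : 0 ≤ pI := PySem.Int.mod_nonneg q hnI
  have hmn : pI < nI := PySem.Int.mod_lt q hnI
  have hpIval : pI = if 0 ≤ q then q else q + nI := by
    split_ifs with hq0
    · have hdq : PySem.Int.floordiv q nI = 0 := by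
        rw [PySem.Int.floordiv_eq_iff_of_pos hnI]
        constructor <;> linarith
      rw [hdq] at hdecq; linarith
    · have hdq : PySem.Int.floordiv q nI = -1 := by
        rw [PySem.Int.floordiv_eq_iff_of_pos hnI]
        constructor <;> linarith
      rw [hdq] at hdecq; linarith
  set K := (k + 1).toNat with hK
  have hrange : PySem.List.pyRange 0 (k + 1) 1 = PySem.List.pyRange 0 (K : Int) 1 := by
    by_cases h : 0 ≤ k + 1
    · rw [hK, Int.toNat_of_nonneg h]
    · rw [PySem.List.pyRange_one_eq_nil (by omega),
        PySem.List.pyRange_one_eq_nil (by omega)]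
  set L := (PySem.List.pyRange 0 (k + 1) 1).foldl (pvStepA nI) xs with hLdef
  have hL : L.length = xs.length := by rw [hLdef]; exact pvFold_length _ _ _
  have hmain := pvFold_get xs hn K pI.toNat (by omega)
  rw [Int.toNat_of_nonneg hm0] at hmain
  rw [hrange] at hLdef
  rw [← hLdef] at hmain
  -- A's final read equals the read at the wrapped position pI
  have hread : PySem.List.pyGetD L q 0 = PySem.List.pyGetD L pI 0 := by
    by_cases hq0 : 0 ≤ q
    · rw [hpIval, if_pos hq0]
    · have hm : (0 : Int) < ((-q).toNat : Int) := by omega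
      have hqm : q = -((-q).toNat : Int) := by omega
      rw [hqm, PySem.List.pyGetD_neg_natCast L (-q).toNat 0 (by omega) (by omega),
        PySem.List.pyGetD_eq_getElem L 0 hm0 (by omega)]
      congr 1
      omega
  rw [hread, hmain]
  -- the read value is nonnegative (from Pre_)
  have hv0 : 0 ≤ PySem.List.pyGetD xs pI 0 := hv0pre
  -- the visit counts agree
  have hcnt : PySem.Int.floordiv ((K : Int) - 1 - pI) nI + 1
      = max 0 (PySem.Int.floordiv (k - pI) nI + 1) := by
    by_cases hk0 : 0 ≤ k
    · have hKk : ((K : Int)) = k + 1 := by omega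
      have hge : 0 ≤ PySem.Int.floordiv (k - pI) nI + 1 :=
        pvCount_nonneg nI (k - pI) hnI (by omega)
      rw [hKk, show (k : Int) + 1 - 1 - pI = k - pI by ring, max_eq_right hge]
    · have hKz : ((K : Int)) = 0 := by omega
      have hneg : PySem.Int.floordiv (k - pI) nI < 0 := by
        rw [PySem.Int.floordiv_lt_iff_lt_mul hnI]
        omega
      rw [hKz, show (0 : Int) - 1 - pI = -1 - pI by ring,
        pvCount_zero nI pI hnI hm0 hmn, max_eq_left (by omega)]
  rw [hcnt]
  unfold pvEatVal
  rw [if_neg (by omega)]
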